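-- pv_equiv track=rewrite | github.com/ghostmkg/programming-language | count_the_number_of_potential_pivots.py | count_potential_pivots
-- ===== SOURCE A (Python) =====
-- def count_potential_pivots(arr):
--     n = len(arr)
--     prefix_max = [0]*n
--     suffix_min = [0]*n
--
--     prefix_max[0] = arr[0]
--     for i in range(1, n):
--         prefix_max[i] = max(prefix_max[i-1], arr[i])
--
--     suffix_min[-1] = arr[-1]
--     for i in range(n-2, -1, -1):
--         suffix_min[i] = min(suffix_min[i+1], arr[i])
--
--     count = 0
--     for i in range(n):
--         left_ok = (i == 0) or (prefix_max[i-1] < arr[i])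
--         right_ok = (i == n-1) or (suffix_min[i+1] > arr[i])
--         if left_ok and right_ok:
--             count += 1
--     return count
-- ===== SOURCE B (Python) =====
-- def count_potential_pivots(arr):
--     # Divide and conquer: solve(lo, hi) returns (min, max, list of pivot values)
--     # of the segment arr[lo:hi]; a pivot of the whole segment is a pivot of its
--     # half that additionally beats the other half's min/max, because "greater
--     # than everything left / less than everything right" splits at mid.
--     def solve(lo, hi):
--         if hi - lo == 1:
--             x = arr[lo]
--             return (x, x, [x])
--         mid = (lo + hi) // 2
--         mn1, mx1, p1 = solve(lo, mid)
--         mn2, mx2, p2 = solve(mid, hi)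
--         piv = [v for v in p1 if v < mn2] + [v for v in p2 if v > mx1]
--         return (min(mn1, mn2), max(mx1, mx2), piv)
--     return len(solve(0, len(arr))[2])
-- ===== Notes on version B (the rewrite author's own statement) =====
-- stated objective: alternative
-- what changed: Replaced the three staged linear passes with prefix_max/suffix_min auxiliary arrays by a divide-and-conquer recursion: each segment returns its (min, max, list of pivot values), and the merge keeps the left half's pivots smaller than the right half's min and the right half's pivots larger than the left half's max.
import Mathlib
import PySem

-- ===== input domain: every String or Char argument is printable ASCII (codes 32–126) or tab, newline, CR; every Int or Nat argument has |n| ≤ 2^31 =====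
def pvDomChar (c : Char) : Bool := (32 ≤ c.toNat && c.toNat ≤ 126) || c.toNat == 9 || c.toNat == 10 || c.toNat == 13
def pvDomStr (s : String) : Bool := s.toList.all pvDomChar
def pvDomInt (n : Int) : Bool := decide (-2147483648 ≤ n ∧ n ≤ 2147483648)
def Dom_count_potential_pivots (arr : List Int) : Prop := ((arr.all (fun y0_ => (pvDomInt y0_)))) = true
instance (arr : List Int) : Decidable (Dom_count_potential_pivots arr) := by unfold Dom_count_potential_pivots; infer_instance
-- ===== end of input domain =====

-- B replaces A's three staged linear passes with auxiliary prefix_max/suffix_min arrays by a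
-- divide-and-conquer recursion returning each segment's (min, max, pivot values) (objective:
-- alternative — a genuinely different algorithm of similar cost).

-- ===== PORT A =====
-- 'for i in range(1, n): prefix_max[i] = max(prefix_max[i-1], arr[i])' — the filled prefix of
-- the array is carried as the list pm (pm.length = i); fuel = number of remaining iterations.
-- All indices are in range under Pre_, so pyGetD (= pyGet? with a default) is exact here.
def pvAPre (arr : List Int) : Nat → List Int → List Int
  | 0, pm => pm
  | f+1, pm => pvAPre arr f
      (pm ++ [max (PySem.List.pyGetD pm ((pm.length : Int) - 1) 0)
                  (PySem.List.pyGetD arr (pm.length : Int) 0)])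

-- 'for i in range(n-2, -1, -1): suffix_min[i] = min(suffix_min[i+1], arr[i])' — the filled
-- suffix [suffix_min[i+1], …, suffix_min[n-1]] is carried as the list sm (new cell prepended);
-- fuel = i+1, so fuel k+1 performs the iteration with i = k.
def pvASuf (arr : List Int) : Nat → List Int → List Int
  | 0, sm => sm
  | k+1, sm => pvASuf arr k
      (min (PySem.List.pyGetD sm 0 0) (PySem.List.pyGetD arr (k : Int) 0) :: sm)

def count_potential_pivots (arr : List Int) : Int :=
  let n := arr.length
  -- arr[0] / arr[-1] raise IndexError on [] — excluded by Pre_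
  let prefix_max := pvAPre arr (n - 1) [PySem.List.pyGetD arr 0 0]
  let suffix_min := pvASuf arr (n - 1) [PySem.List.pyGetD arr (-1) 0]
  (List.range n).foldl (fun (count : Int) (i : Nat) =>
    let left_ok := decide (i = 0) ||
      decide (PySem.List.pyGetD prefix_max ((i : Int) - 1) 0 < PySem.List.pyGetD arr (i : Int) 0)
    let right_ok := decide (i = n - 1) ||
      decide (PySem.List.pyGetD suffix_min ((i : Int) + 1) 0 > PySem.List.pyGetD arr (i : Int) 0)
    if left_ok && right_ok then count + 1 else count) 0

-- ===== PORT B =====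
-- Source B's solve(lo, hi): natural recursion in Python; here fuel (= segment length bound) makes
-- the same computation total — it is never exhausted on the inputs Pre_ admits.
-- (lo + hi) // 2 on nonnegative ints equals Nat division, exact here.
def pvSolve (arr : List Int) : Nat → Nat → Nat → Int × Int × List Int
  | 0, _, _ => (0, 0, [])
  | f+1, lo, hi =>
    if hi - lo = 1 then
      let x := PySem.List.pyGetD arr (lo : Int) 0
      (x, x, [x])
    else
      let mid := (lo + hi) / 2
      let r1 := pvSolve arr f lo mid
      let r2 := pvSolve arr f mid hi
      (min r1.1 r2.1, max r1.2.1 r2.2.1,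
        r1.2.2.filter (fun v => decide (v < r2.1)) ++
          r2.2.2.filter (fun v => decide (r1.2.1 < v)))

def count_potential_pivots_alt (arr : List Int) : Int :=
  ((pvSolve arr arr.length 0 arr.length).2.2.length : Int)

-- ===== PRECONDITION & SPEC =====
-- A (and B) raise on the empty list (A: IndexError at arr[0], B: unbounded recursion);
-- only those inputs are excluded.
def Pre_count_potential_pivots (arr : List Int) : Prop := arr ≠ []
instance (arr : List Int) : Decidable (Pre_count_potential_pivots arr) := by
  unfold Pre_count_potential_pivots; infer_instance
def pvWitness_count_potential_pivots : List Int := [3, 1, 2, 5, 4]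

def Spec_count_potential_pivots (arr : List Int) (out : Int) : Prop := out = count_potential_pivots_alt arr
instance (arr : List Int) (out : Int) : Decidable (Spec_count_potential_pivots arr out) := by unfold Spec_count_potential_pivots; infer_instance

-- ===== CLAIM (what is proved, stated in full; the proofs are below) =====
def Claim_equal_count_potential_pivots : Prop := ∀ (arr : List Int), Dom_count_potential_pivots arr → Pre_count_potential_pivots arr → Spec_count_potential_pivots arr (count_potential_pivots arr)

-- ===== LEMMAS AND PROOFS =====

-- reference values: arr[i] (0 default), running prefix max, and min over the last k+1 elements
def pvG (arr : List Int) (i : Nat) : Int := arr.getD i 0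

def pvPM (arr : List Int) : Nat → Int
  | 0 => pvG arr 0
  | i+1 => max (pvPM arr i) (pvG arr (i+1))

def pvDM (arr : List Int) : Nat → Int
  | 0 => pvG arr (arr.length - 1)
  | k+1 => min (pvDM arr k) (pvG arr (arr.length - 1 - (k+1)))

def pvLok (arr : List Int) (i : Nat) : Bool :=
  decide (i = 0) || decide (pvPM arr (i - 1) < pvG arr i)

def pvPred (arr : List Int) (i : Nat) : Bool :=
  pvLok arr i &&
    (decide (i = arr.length - 1) || decide (pvDM arr (arr.length - 2 - i) > pvG arr i))

theorem pvFoldCount (p : Nat → Bool) :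
    ∀ (l : List Nat) (c : Int),
      l.foldl (fun c i => if p i then c + 1 else c) c = c + (l.countP p : Int) := by
  intro l
  induction l with
  | nil => intro c; simp
  | cons x xs ih =>
    intro c
    by_cases h : p x <;> simp [List.foldl, h, ih] <;> omega

theorem pvAPre_inv (arr : List Int) :
    ∀ (f j : Nat),
      pvAPre arr f ((List.range (j+1)).map (pvPM arr)) =
        (List.range (j+1+f)).map (pvPM arr) := by
  intro f
  induction f with
  | zero => intro j; simp [pvAPre]
  | succ f ih =>
    intro j
    have hlen : ((List.range (j+1)).map (pvPM arr)).length = j + 1 := by simp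
    have hget : PySem.List.pyGetD ((List.range (j+1)).map (pvPM arr))
        ((((List.range (j+1)).map (pvPM arr)).length : Int) - 1) 0 = pvPM arr j := by
      rw [hlen]
      have h1 : ((j + 1 : Nat) : Int) - 1 = ((j : Nat) : Int) := by push_cast; ring
      rw [h1, PySem.List.pyGetD_natCast]
      rw [List.getD_eq_getElem?_getD, List.getElem?_map,
        List.getElem?_range (by omega : j < j + 1)]
      rfl
    have harr : PySem.List.pyGetD arr ((((List.range (j+1)).map (pvPM arr)).length : Int)) 0
        = pvG arr (j+1) := by
      rw [hlen, PySem.List.pyGetD_natCast]; rfl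
    rw [pvAPre, hget, harr]
    have hstep : (List.range (j+1)).map (pvPM arr) ++ [max (pvPM arr j) (pvG arr (j+1))]
        = (List.range (j+1+1)).map (pvPM arr) := by
      rw [List.range_succ (n := j+1), List.map_append]
      rfl
    rw [hstep, show j+1+(f+1) = (j+1)+1+f from by omega]
    exact ih (j+1)

-- A's suffix state at fuel f: [suffix_min[f], …, suffix_min[n-1]]
def pvSState (arr : List Int) (f : Nat) : List Int :=
  (List.range (arr.length - f)).map (fun t => pvDM arr (arr.length - 1 - f - t))

theorem pvASuf_inv (arr : List Int) :
    ∀ (f : Nat), f ≤ arr.length - 1 →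
      pvASuf arr f (pvSState arr f) = pvSState arr 0 := by
  intro f
  induction f with
  | zero => intro _; simp [pvASuf]
  | succ k ih =>
    intro hk
    have hhead : PySem.List.pyGetD (pvSState arr (k+1)) 0 0
        = pvDM arr (arr.length - 2 - k) := by
      unfold pvSState
      rw [PySem.List.pyGetD_zero]
      obtain ⟨m, hm⟩ : ∃ m, arr.length - (k+1) = m + 1 := ⟨arr.length - (k+1) - 1, by omega⟩
      rw [hm, List.range_succ_eq_map]
      simp only [List.map_cons, List.getD_cons_zero]
      congr 1
      omega
    have harr : PySem.List.pyGetD arr (k : Int) 0 = pvG arr k := by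
      rw [PySem.List.pyGetD_natCast]; rfl
    rw [pvASuf, hhead, harr]
    have hmin : min (pvDM arr (arr.length - 2 - k)) (pvG arr k) = pvDM arr (arr.length - 1 - k) := by
      by_cases hke : k = arr.length - 1
      · have h2 : arr.length - 2 - k = 0 := by omega
        have h1 : arr.length - 1 - k = 0 := by omega
        rw [h2, h1]
        have hg : pvG arr k = pvDM arr 0 := by
          show pvG arr k = pvG arr (arr.length - 1); rw [hke]
        rw [hg, min_self]
      · have h1 : arr.length - 1 - k = (arr.length - 2 - k) + 1 := by omega
        rw [h1, pvDM]
        congr 2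
        omega
    have hcons : pvDM arr (arr.length - 1 - k) :: pvSState arr (k+1) = pvSState arr k := by
      unfold pvSState
      obtain ⟨m, hm⟩ : ∃ m, arr.length - k = m + 1 := ⟨arr.length - k - 1, by omega⟩
      have hm' : arr.length - (k+1) = m := by omega
      rw [hm, hm', List.range_succ_eq_map, List.map_cons, List.map_map]
      refine congrArg₂ List.cons (by norm_num) ?_
      apply List.map_congr_left
      intro t ht
      show pvDM arr (arr.length - 1 - (k+1) - t) = pvDM arr (arr.length - 1 - k - (t+1))
      congr 1
      omega
    rw [hmin, hcons]
    exact ih (by omega)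

theorem pvA_eq (arr : List Int) (h : arr ≠ []) :
    count_potential_pivots arr = ((List.range arr.length).countP (pvPred arr) : Int) := by
  have hn : 1 ≤ arr.length := List.length_pos_iff.mpr h
  unfold count_potential_pivots
  have h0 : PySem.List.pyGetD arr 0 0 = pvG arr 0 := by
    rw [PySem.List.pyGetD_zero]; rfl
  have hP : pvAPre arr (arr.length - 1) [PySem.List.pyGetD arr 0 0]
      = (List.range arr.length).map (pvPM arr) := by
    rw [h0]
    have hbase : [pvG arr 0] = (List.range 1).map (pvPM arr) := by simp [pvPM]
    rw [hbase, pvAPre_inv arr (arr.length - 1) 0,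
      show 0+1+(arr.length-1) = arr.length from by omega]
  have hlast : PySem.List.pyGetD arr (-1) 0 = pvDM arr 0 := by
    rw [PySem.List.pyGetD_neg_one arr 0 h, pvDM]
    rw [List.getLast_eq_getElem, pvG, List.getD_eq_getElem?_getD]
    simp [List.getElem?_eq_getElem (by omega : arr.length - 1 < arr.length)]
  have hS : pvASuf arr (arr.length - 1) [PySem.List.pyGetD arr (-1) 0] = pvSState arr 0 := by
    rw [hlast]
    have hbase : [pvDM arr 0] = pvSState arr (arr.length - 1) := by
      unfold pvSState
      have : arr.length - (arr.length - 1) = 1 := by omega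
      rw [this]
      simp
    rw [hbase]
    exact pvASuf_inv arr (arr.length - 1) le_rfl
  simp only [hP, hS]
  rw [pvFoldCount]
  rw [Int.zero_add]
  congr 1
  apply List.countP_congr
  intro i hi
  rw [List.mem_range] at hi
  have hgi : PySem.List.pyGetD arr (i : Int) 0 = pvG arr i := by
    rw [PySem.List.pyGetD_natCast]; rfl
  have hleft : (decide (i = 0) ||
      decide (PySem.List.pyGetD ((List.range arr.length).map (pvPM arr)) ((i : Int) - 1) 0
        < PySem.List.pyGetD arr (i : Int) 0)) = pvLok arr i := by
    cases i with
    | zero => simp [pvLok]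
    | succ j =>
      rw [hgi]
      have h1 : ((j + 1 : Nat) : Int) - 1 = ((j : Nat) : Int) := by push_cast; ring
      rw [h1, PySem.List.pyGetD_natCast]
      have h2 : (List.map (pvPM arr) (List.range arr.length)).getD j 0 = pvPM arr j := by
        rw [List.getD_eq_getElem?_getD, List.getElem?_map,
          List.getElem?_range (by omega : j < arr.length)]
        rfl
      rw [h2]
      unfold pvLok
      simp only [Nat.succ_sub_one]
      rfl
  have hright : (decide (i = arr.length - 1) ||
      decide (PySem.List.pyGetD (pvSState arr 0) ((i : Int) + 1) 0
        > PySem.List.pyGetD arr (i : Int) 0)) =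
      (decide (i = arr.length - 1) ||
        decide (pvDM arr (arr.length - 2 - i) > pvG arr i)) := by
    by_cases he : i = arr.length - 1
    · simp [he]
    · rw [hgi]
      have hc : ((i : Int) + 1) = ((i + 1 : Nat) : Int) := by push_cast; ring
      rw [hc, PySem.List.pyGetD_natCast]
      have h2 : (pvSState arr 0).getD (i+1) 0 = pvDM arr (arr.length - 2 - i) := by
        unfold pvSState
        simp only [Nat.sub_zero]
        rw [List.getD_eq_getElem?_getD, List.getElem?_map,
          List.getElem?_range (by omega : i + 1 < arr.length)]
        simp only [Option.map_some, Option.getD_some]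
        congr 1
        omega
      rw [h2]
  simp only [hleft, hright]
  rfl

-- ===== B-side characterization =====

-- i is a pivot of the segment [lo, hi): greater than everything before it in the segment,
-- smaller than everything after it in the segment
def pvIsPiv (arr : List Int) (lo hi i : Nat) : Bool :=
  decide (∀ j, j < i → lo ≤ j → pvG arr j < pvG arr i) &&
  decide (∀ j, j < hi → i < j → pvG arr i < pvG arr j)

def pvPivs (arr : List Int) (lo hi : Nat) : List Int :=
  ((List.range' lo (hi - lo)).filter (pvIsPiv arr lo hi)).map (pvG arr)

theorem pvDecideSplit (P Q R : Prop) [Decidable P] [Decidable Q] [Decidable R]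
    (h : P ↔ Q ∧ R) : decide P = (decide Q && decide R) := by
  by_cases hq : Q <;> by_cases hr : R <;> simp [hq, hr, h]

theorem pvSolve_spec (arr : List Int) :
    ∀ (f lo hi : Nat), lo < hi → hi - lo ≤ f →
      ((∀ j, lo ≤ j → j < hi → (pvSolve arr f lo hi).1 ≤ pvG arr j ∧ pvG arr j ≤ (pvSolve arr f lo hi).2.1) ∧
       (∃ j, lo ≤ j ∧ j < hi ∧ (pvSolve arr f lo hi).1 = pvG arr j) ∧
       (∃ j, lo ≤ j ∧ j < hi ∧ (pvSolve arr f lo hi).2.1 = pvG arr j) ∧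
       (pvSolve arr f lo hi).2.2 = pvPivs arr lo hi) := by
  intro f
  induction f with
  | zero => intro lo hi h1 h2; omega
  | succ f ih =>
    intro lo hi h1 h2
    by_cases hbase : hi - lo = 1
    · have hhi : hi = lo + 1 := by omega
      simp only [pvSolve, hbase]
      have hx : PySem.List.pyGetD arr (lo : Int) 0 = pvG arr lo := by
        rw [PySem.List.pyGetD_natCast]; rfl
      refine ⟨?_, ⟨lo, le_rfl, by omega, hx⟩, ⟨lo, le_rfl, by omega, hx⟩, ?_⟩
      · intro j hj1 hj2
        have : j = lo := by omega
        subst this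
        exact ⟨le_of_eq hx, le_of_eq hx.symm⟩
      · unfold pvPivs
        rw [hbase]
        have hpv : pvIsPiv arr lo hi lo = true := by
          unfold pvIsPiv
          rw [Bool.and_eq_true, decide_eq_true_eq, decide_eq_true_eq]
          exact ⟨fun j hj1 hj2 => absurd hj1 (by omega),
                 fun j hj1 hj2 => absurd hj1 (by omega)⟩
        simp [List.range', hpv, hx]
    · -- recursive case
      have h2lt : 2 ≤ hi - lo := by omega
      simp only [pvSolve, if_neg hbase]
      have hmid1 : lo < (lo + hi) / 2 := by omega
      have hmid2 : (lo + hi) / 2 < hi := by omega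
      obtain ⟨hbd1, ⟨jm1, hjm1a, hjm1b, hjm1c⟩, ⟨jM1, hjM1a, hjM1b, hjM1c⟩, hp1⟩ :=
        ih lo ((lo + hi) / 2) hmid1 (by omega)
      obtain ⟨hbd2, ⟨jm2, hjm2a, hjm2b, hjm2c⟩, ⟨jM2, hjM2a, hjM2b, hjM2c⟩, hp2⟩ :=
        ih ((lo + hi) / 2) hi hmid2 (by omega)
      set mid := (lo + hi) / 2 with hmid
      set r1 := pvSolve arr f lo mid with hr1
      set r2 := pvSolve arr f mid hi with hr2
      refine ⟨?_, ?_, ?_, ?_⟩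
      · intro j hj1 hj2
        by_cases hjm : j < mid
        · obtain ⟨hlb, hub⟩ := hbd1 j hj1 hjm
          constructor
          · exact le_trans (min_le_left _ _) hlb
          · exact le_trans hub (le_max_left _ _)
        · obtain ⟨hlb, hub⟩ := hbd2 j (by omega) hj2
          constructor
          · exact le_trans (min_le_right _ _) hlb
          · exact le_trans hub (le_max_right _ _)
      · rcases le_total r1.1 r2.1 with hc | hc
        · exact ⟨jm1, hjm1a, by omega, by show min r1.1 r2.1 = _; rw [min_eq_left hc, hjm1c]⟩
        · exact ⟨jm2, by omega, hjm2b, by show min r1.1 r2.1 = _; rw [min_eq_right hc, hjm2c]⟩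
      · rcases le_total r1.2.1 r2.2.1 with hc | hc
        · exact ⟨jM2, by omega, hjM2b, by show max r1.2.1 r2.2.1 = _; rw [max_eq_right hc, hjM2c]⟩
        · exact ⟨jM1, hjM1a, by omega, by show max r1.2.1 r2.2.1 = _; rw [max_eq_left hc, hjM1c]⟩
      · -- the merge step
        rw [hp1, hp2]
        unfold pvPivs
        -- split the index range at mid
        have hsplit : List.range' lo (hi - lo)
            = List.range' lo (mid - lo) ++ List.range' mid (hi - mid) := by
          rw [show hi - lo = (mid - lo) + (hi - mid) from by omega, ← List.range'_append,
            show lo + 1 * (mid - lo) = mid from by omega]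
        rw [hsplit, List.filter_append, List.map_append]
        -- v < r2.1 ↔ v smaller than everything in the right segment
        have hminiff : ∀ v : Int, (v < r2.1) ↔ (∀ j, j < hi → mid ≤ j → v < pvG arr j) := by
          intro v
          constructor
          · intro hv j hj1 hj2
            exact lt_of_lt_of_le hv (hbd2 j hj2 hj1).1
          · intro hv
            rw [hjm2c]
            exact hv jm2 hjm2b hjm2a
        have hmaxiff : ∀ v : Int, (r1.2.1 < v) ↔ (∀ j, j < mid → lo ≤ j → pvG arr j < v) := by
          intro v
          constructor
          · intro hv j hj1 hj2
            exact lt_of_le_of_lt (hbd1 j hj2 hj1).2 hv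
          · intro hv
            rw [hjM1c]
            exact hv jM1 hjM1b hjM1a
        congr 1
        · -- left chunk
          rw [List.filter_map]
          congr 1
          rw [List.filter_filter]
          apply List.filter_congr
          intro i hil
          rw [List.mem_range'_1] at hil
          unfold pvIsPiv
          simp only [Function.comp_apply]
          have hRsplit : (∀ j, j < hi → i < j → pvG arr i < pvG arr j) ↔
              ((∀ j, j < mid → i < j → pvG arr i < pvG arr j) ∧
               (∀ j, j < hi → mid ≤ j → pvG arr i < pvG arr j)) := by
            constructor
            · intro h
              exact ⟨fun j hj1 hj2 => h j (by omega) hj2,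
                     fun j hj1 hj2 => h j hj1 (by omega)⟩
            · intro ⟨ha, hb⟩ j hj1 hj2
              by_cases hjm : j < mid
              · exact ha j hjm hj2
              · exact hb j hj1 (by omega)
          rw [pvDecideSplit _ _ _ hRsplit]
          rw [show (decide (pvG arr i < r2.1)) = decide (∀ j, j < hi → mid ≤ j → pvG arr i < pvG arr j) from
            decide_eq_decide.mpr (hminiff (pvG arr i))]
          exact (by decide : ∀ (a b c : Bool), (c && (a && b)) = (a && (b && c))) _ _ _
        · -- right chunk
          rw [List.filter_map]
          congr 1
          rw [List.filter_filter]
          apply List.filter_congr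
          intro i hil
          rw [List.mem_range'_1] at hil
          unfold pvIsPiv
          simp only [Function.comp_apply]
          have hLsplit : (∀ j, j < i → lo ≤ j → pvG arr j < pvG arr i) ↔
              ((∀ j, j < mid → lo ≤ j → pvG arr j < pvG arr i) ∧
               (∀ j, j < i → mid ≤ j → pvG arr j < pvG arr i)) := by
            constructor
            · intro h
              exact ⟨fun j hj1 hj2 => h j (by omega) hj2,
                     fun j hj1 hj2 => h j hj1 (by omega)⟩
            · intro ⟨ha, hb⟩ j hj1 hj2
              by_cases hjm : j < mid
              · exact ha j hjm hj2
              · exact hb j hj1 (by omega)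
          rw [pvDecideSplit _ _ _ hLsplit]
          rw [show (decide (r1.2.1 < pvG arr i)) = decide (∀ j, j < mid → lo ≤ j → pvG arr j < pvG arr i) from
            decide_eq_decide.mpr (hmaxiff (pvG arr i))]
          exact (by decide : ∀ (a b c : Bool), (a && (b && c)) = (a && b && c)) _ _ _

-- prefix max bounds strictly below x ↔ every prefix element strictly below x
theorem pvPM_lt (arr : List Int) : ∀ (k : Nat) (x : Int),
    (pvPM arr k < x) ↔ (∀ j, j ≤ k → pvG arr j < x) := by
  intro k
  induction k with
  | zero =>
    intro x
    constructor
    · intro h j hj; interval_cases j; exact h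
    · intro h; exact h 0 le_rfl
  | succ k ih =>
    intro x
    rw [pvPM, max_lt_iff, ih]
    constructor
    · intro ⟨ha, hb⟩ j hj
      by_cases hjk : j ≤ k
      · exact ha j hjk
      · have : j = k + 1 := by omega
        subst this; exact hb
    · intro h
      exact ⟨fun j hj => h j (by omega), h (k+1) le_rfl⟩

theorem pvDM_gt (arr : List Int) : ∀ (k : Nat) (x : Int),
    (x < pvDM arr k) ↔ (∀ t, t ≤ k → x < pvG arr (arr.length - 1 - t)) := by
  intro k
  induction k with
  | zero =>
    intro x
    constructor
    · intro h t ht; interval_cases t; exact h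
    · intro h; exact h 0 le_rfl
  | succ k ih =>
    intro x
    rw [pvDM, lt_min_iff, ih]
    constructor
    · intro ⟨ha, hb⟩ t ht
      by_cases htk : t ≤ k
      · exact ha t htk
      · have : t = k + 1 := by omega
        subst this; exact hb
    · intro h
      exact ⟨fun t ht => h t (by omega), h (k+1) le_rfl⟩

theorem pvPred_eq_isPiv (arr : List Int) (i : Nat) (hi : i < arr.length) :
    pvPred arr i = pvIsPiv arr 0 arr.length i := by
  unfold pvPred pvIsPiv pvLok
  have hleft : (decide (i = 0) || decide (pvPM arr (i - 1) < pvG arr i))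
      = decide (∀ j, j < i → 0 ≤ j → pvG arr j < pvG arr i) := by
    cases i with
    | zero => simp
    | succ k =>
      have : ¬ (k + 1 = 0) := by omega
      simp only [decide_eq_false this, Bool.false_or, Nat.succ_sub_one]
      apply decide_eq_decide.mpr
      rw [pvPM_lt]
      constructor
      · intro h j hj _; exact h j (by omega)
      · intro h j hj; exact h j (by omega) (by omega)
  have hright : (decide (i = arr.length - 1) || decide (pvDM arr (arr.length - 2 - i) > pvG arr i))
      = decide (∀ j, j < arr.length → i < j → pvG arr i < pvG arr j) := by
    by_cases he : i = arr.length - 1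
    · simp only [decide_eq_true he, Bool.true_or]
      symm
      apply decide_eq_true
      intro j hj1 hj2
      omega
    · simp only [decide_eq_false he, Bool.false_or]
      apply decide_eq_decide.mpr
      show pvG arr i < pvDM arr (arr.length - 2 - i) ↔ _
      rw [pvDM_gt]
      constructor
      · intro h j hj1 hj2
        have := h (arr.length - 1 - j) (by omega)
        rwa [show arr.length - 1 - (arr.length - 1 - j) = j from by omega] at this
      · intro h t ht
        exact h (arr.length - 1 - t) (by omega) (by omega)
  rw [hleft, hright]

theorem pvB_eq (arr : List Int) (h : arr ≠ []) :
    count_potential_pivots_alt arr = ((List.range arr.length).countP (pvPred arr) : Int) := by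
  have hn : 0 < arr.length := List.length_pos_iff.mpr h
  unfold count_potential_pivots_alt
  obtain ⟨-, -, -, hp⟩ := pvSolve_spec arr arr.length 0 arr.length hn (by omega)
  rw [hp]
  unfold pvPivs
  rw [List.length_map, List.countP_eq_length_filter]
  congr 1
  rw [Nat.sub_zero, ← List.range_eq_range']
  congr 1
  apply List.filter_congr
  intro i hi
  rw [List.mem_range] at hi
  exact (pvPred_eq_isPiv arr i hi).symm

-- ===== VERDICT (by name: the statement is the Claim_ definition above) =====
theorem count_potential_pivots_spec : Claim_equal_count_potential_pivots := by
  intro arr _ hpre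
  unfold Spec_count_potential_pivots
  rw [pvA_eq arr hpre, pvB_eq arr hpre]
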